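-- pv_equiv track=rewrite | github.com/lowspeclabs/SmallCTL | src/smallctl/tools/ssh_files.py | _normalize_whitespace_with_spans
-- ===== SOURCE A (Python) =====
-- def _normalize_whitespace_with_spans(text: str) -> tuple[str, list[tuple[int, int]]]:
--     normalized_chars: list[str] = []
--     spans: list[tuple[int, int]] = []
--     index = 0
--     while index < len(text):
--         char = text[index]
--         if char.isspace():
--             end = index + 1
--             while end < len(text) and text[end].isspace():
--                 end += 1
--             normalized_chars.append(" ")
--             spans.append((index, end))
--             index = end
--             continue
--         normalized_chars.append(char)
--         spans.append((index, index + 1))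
--         index += 1
--     return "".join(normalized_chars), spans
-- ===== SOURCE B (Python) =====
-- def _normalize_whitespace_with_spans(text: str) -> tuple[str, list[tuple[int, int]]]:
--     n = len(text)
--     space = [c.isspace() for c in text]
--     # nxt[i] = first index j >= i with a non-space char, or n if none
--     nxt = [n] * (n + 1)
--     for i in range(n - 1, -1, -1):
--         nxt[i] = i if not space[i] else nxt[i + 1]
--     out: list[str] = []
--     spans: list[tuple[int, int]] = []
--     for i in range(n):
--         if not space[i]:
--             out.append(text[i])
--             spans.append((i, i + 1))
--         elif i == 0 or not space[i - 1]:
--             out.append(" ")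
--             spans.append((i, nxt[i]))
--     return "".join(out), spans
-- ===== Notes on version B (the rewrite author's own statement) =====
-- stated objective: alternative
-- what changed: Replaces A's run-scanning while loop (with its inner whitespace scan and index jumps) by a precomputed next-non-space table filled right-to-left plus a single per-character classification pass that emits a space only at run starts.
import Mathlib
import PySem

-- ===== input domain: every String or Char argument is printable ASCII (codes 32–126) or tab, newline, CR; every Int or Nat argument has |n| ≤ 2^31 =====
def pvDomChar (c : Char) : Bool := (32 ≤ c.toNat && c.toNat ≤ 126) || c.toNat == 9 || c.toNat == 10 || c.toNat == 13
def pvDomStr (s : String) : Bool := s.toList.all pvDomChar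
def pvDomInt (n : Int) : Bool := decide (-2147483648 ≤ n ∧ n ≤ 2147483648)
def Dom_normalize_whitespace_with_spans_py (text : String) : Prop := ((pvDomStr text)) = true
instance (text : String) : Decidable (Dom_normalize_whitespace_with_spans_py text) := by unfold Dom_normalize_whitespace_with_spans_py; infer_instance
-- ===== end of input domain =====

-- B replaces A's run-scanning while loop (with its inner whitespace scan) by a precomputed
-- next-non-space table plus a per-character classification pass; objective: alternative.

-- ===== PORT A =====

-- inner 'while end < len(text) and text[end].isspace(): end += 1'
def nwsInner (cs : List Char) (e : Nat) : Nat :=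
  if h : e < cs.length then
    if PySem.Chars.isspace cs[e] then nwsInner cs (e + 1) else e
  else e
termination_by cs.length - e

theorem nwsInner_ge_aux (cs : List Char) :
    ∀ (d e : Nat), cs.length - e ≤ d → e ≤ nwsInner cs e := by
  intro d
  induction d with
  | zero =>
    intro e hd
    rw [nwsInner, dif_neg (by omega)]
  | succ d ih =>
    intro e hd
    rw [nwsInner]
    split
    · split
      · have := ih (e + 1) (by omega); omega
      · exact le_refl e
    · exact le_refl e

theorem nwsInner_ge (cs : List Char) (e : Nat) : e ≤ nwsInner cs e :=
  nwsInner_ge_aux cs (cs.length - e) e le_rfl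

-- outer 'while index < len(text)' with the two accumulator lists
def nwsLoopA (cs : List Char) (index : Nat) (nacc : List Char) (sacc : List (Int × Int)) :
    List Char × List (Int × Int) :=
  if h : index < cs.length then
    let c := cs[index]
    if PySem.Chars.isspace c then
      let e := nwsInner cs (index + 1)
      nwsLoopA cs e (nacc ++ [' ']) (sacc ++ [((index : Int), (e : Int))])
    else
      nwsLoopA cs (index + 1) (nacc ++ [c]) (sacc ++ [((index : Int), (index : Int) + 1)])
  else (nacc, sacc)
termination_by cs.length - index
decreasing_by
  · have := nwsInner_ge cs (index + 1); omega
  · omega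

def normalize_whitespace_with_spans_py (text : String) : String × (List (Int × Int)) :=
  let (ncs, sps) := nwsLoopA text.toList 0 [] []
  (String.ofList ncs, sps)

-- ===== PORT B =====

-- 'space = [c.isspace() for c in text]'
def nwsSpace (cs : List Char) : List Bool := cs.map PySem.Chars.isspace

-- 'nxt = [n]*(n+1); for i in range(n-1, -1, -1): nxt[i] = i if not space[i] else nxt[i+1]'
-- (the right-to-left fill rendered as a foldr that builds the table back to front; same cells)
def nwsNxt (sp : List Bool) (n : Nat) : List Nat :=
  (List.range n).foldr
    (fun i acc => (if sp.getD i false = false then i else acc.headD n) :: acc) [n]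

-- 'for i in range(n): …' with the two accumulator lists
def nwsFwd (cs : List Char) (sp : List Bool) (nxt : List Nat) (n : Nat) (i : Nat)
    (out : List Char) (spans : List (Int × Int)) : List Char × List (Int × Int) :=
  if i < n then
    if sp.getD i false = false then
      nwsFwd cs sp nxt n (i + 1) (out ++ [cs.getD i ' ']) (spans ++ [((i : Int), (i : Int) + 1)])
    else if i = 0 ∨ sp.getD (i - 1) false = false then
      nwsFwd cs sp nxt n (i + 1) (out ++ [' ']) (spans ++ [((i : Int), ((nxt.getD i n : Nat) : Int))])
    else
      nwsFwd cs sp nxt n (i + 1) out spans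
  else (out, spans)
termination_by n - i

def normalize_whitespace_with_spans_py_alt (text : String) : String × (List (Int × Int)) :=
  let cs := text.toList
  let n := cs.length
  let sp := nwsSpace cs
  let nxt := nwsNxt sp n
  let (out, spans) := nwsFwd cs sp nxt n 0 [] []
  (String.ofList out, spans)

-- ===== PRECONDITION & SPEC =====
def Spec_normalize_whitespace_with_spans_py (text : String) (out : String × (List (Int × Int))) : Prop := out = normalize_whitespace_with_spans_py_alt text
instance (text : String) (out : String × (List (Int × Int))) : Decidable (Spec_normalize_whitespace_with_spans_py text out) := by unfold Spec_normalize_whitespace_with_spans_py; infer_instance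

-- ===== CLAIM (what is proved, stated in full; the proofs are below) =====
def Claim_equal_normalize_whitespace_with_spans_py : Prop := ∀ (text : String), Dom_normalize_whitespace_with_spans_py text → Spec_normalize_whitespace_with_spans_py text (normalize_whitespace_with_spans_py text)

-- ===== LEMMAS AND PROOFS =====

theorem nwsInner_eq_aux (cs : List Char) :
    ∀ (d e : Nat), cs.length - e ≤ d →
    nwsInner cs e = e + ((cs.drop e).takeWhile PySem.Chars.isspace).length := by
  intro d
  induction d with
  | zero =>
    intro e hd
    rw [nwsInner, dif_neg (by omega), List.drop_eq_nil_of_le (by omega)]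
    simp
  | succ d ih =>
    intro e hd
    rw [nwsInner]
    split
    · rename_i h
      rw [← List.getElem_cons_drop h]
      split
      · rename_i hs
        rw [ih (e + 1) (by omega)]
        simp only [List.takeWhile_cons, hs, if_pos, List.length_cons]
        omega
      · rename_i hs
        simp [hs]
    · rename_i h
      rw [List.drop_eq_nil_of_le (by omega)]
      simp

theorem nwsInner_eq (cs : List Char) (e : Nat) :
    nwsInner cs e = e + ((cs.drop e).takeWhile PySem.Chars.isspace).length :=
  nwsInner_eq_aux cs (cs.length - e) e le_rfl

-- N cs i: the first non-space position ≥ i (or cs.length)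
def nwsN (cs : List Char) (i : Nat) : Nat :=
  i + ((cs.drop i).takeWhile PySem.Chars.isspace).length

theorem nwsSpace_getD_lt (cs : List Char) (i : Nat) (h : i < cs.length) :
    (nwsSpace cs).getD i false = PySem.Chars.isspace cs[i] := by
  simp [nwsSpace, List.getD_eq_getElem?_getD, h]

theorem nwsSpace_getD_ge (cs : List Char) (i : Nat) (h : ¬ i < cs.length) :
    (nwsSpace cs).getD i false = false := by
  simp [nwsSpace, List.getD_eq_getElem?_getD, List.getElem?_eq_none_iff.mpr (by simpa using h)]

theorem nwsN_le (cs : List Char) (i : Nat) (h : i ≤ cs.length) : nwsN cs i ≤ cs.length := by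
  have h1 := (List.takeWhile_sublist (p := PySem.Chars.isspace) (l := cs.drop i)).length_le
  simp only [List.length_drop] at h1
  unfold nwsN; omega

theorem nwsN_nonspace (cs : List Char) (i : Nat) (h : i < cs.length)
    (hs : PySem.Chars.isspace cs[i] = false) : nwsN cs i = i := by
  unfold nwsN
  rw [← List.getElem_cons_drop h, List.takeWhile_cons, hs]
  simp

theorem nwsN_space (cs : List Char) (i : Nat) (h : i < cs.length)
    (hs : PySem.Chars.isspace cs[i] = true) : nwsN cs i = nwsN cs (i + 1) := by
  unfold nwsN
  rw [← List.getElem_cons_drop h, List.takeWhile_cons, hs]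
  simp; omega

theorem nwsN_interior (cs : List Char) (i k : Nat) (h1 : i ≤ k) (h2 : k < nwsN cs i) :
    ∃ hk : k < cs.length, PySem.Chars.isspace cs[k] = true := by
  have htl : ((cs.drop i).takeWhile PySem.Chars.isspace).length ≤ cs.length - i := by
    have := (List.takeWhile_sublist (p := PySem.Chars.isspace) (l := cs.drop i)).length_le
    simpa using this
  have hlen : k < cs.length := by unfold nwsN at h2; omega
  refine ⟨hlen, ?_⟩
  have hkt : k - i < ((cs.drop i).takeWhile PySem.Chars.isspace).length := by
    unfold nwsN at h2; omega
  have hpre := List.takeWhile_prefix (l := cs.drop i) (p := PySem.Chars.isspace)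
  have hmem := List.getElem_mem hkt
  have hsp := List.mem_takeWhile_imp hmem
  have hgd : ((cs.drop i).takeWhile PySem.Chars.isspace)[k - i]'hkt = cs[k] := by
    rw [hpre.getElem]
    simp only [List.getElem_drop]
    simp [show i + (k - i) = k from by omega]
  rwa [hgd] at hsp

theorem nwsN_stop_aux (cs : List Char) :
    ∀ (d i : Nat), cs.length - i ≤ d → (nwsSpace cs).getD (nwsN cs i) false = false := by
  intro d
  induction d with
  | zero =>
    intro i hd
    have hEq : nwsN cs i = i := by
      unfold nwsN
      rw [List.drop_eq_nil_of_le (by omega)]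
      simp
    rw [hEq]
    exact nwsSpace_getD_ge cs i (by omega)
  | succ d ih =>
    intro i hd
    by_cases h : i < cs.length
    · by_cases hs : PySem.Chars.isspace cs[i] = true
      · rw [nwsN_space cs i h hs]
        exact ih (i + 1) (by omega)
      · rw [nwsN_nonspace cs i h (eq_false_of_ne_true hs)]
        rw [nwsSpace_getD_lt cs i h]
        exact eq_false_of_ne_true hs
    · have hEq : nwsN cs i = i := by
        unfold nwsN
        rw [List.drop_eq_nil_of_le (by omega)]
        simp
      rw [hEq]
      exact nwsSpace_getD_ge cs i h

theorem nwsN_stop (cs : List Char) (i : Nat) :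
    (nwsSpace cs).getD (nwsN cs i) false = false :=
  nwsN_stop_aux cs (cs.length - i) i le_rfl

-- nxt characterization: nwsNxt fills cell i with nwsN cs i
theorem nwsNxt_spec_core (cs : List Char) :
    ∀ (d k : Nat), cs.length - k ≤ d → k ≤ cs.length →
    (List.range' k (cs.length - k)).foldr
      (fun i acc => (if (nwsSpace cs).getD i false = false then i else acc.headD cs.length) :: acc)
      [cs.length]
    = (List.range' k (cs.length + 1 - k)).map (nwsN cs) := by
  intro d
  induction d with
  | zero =>
    intro k hd hk
    have hk' : k = cs.length := by omega
    subst hk'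
    simp [nwsN]
  | succ d ih =>
    intro k hd hk
    by_cases h : k < cs.length
    · have hrec := ih (k + 1) (by omega) (by omega)
      rw [show cs.length - k = (cs.length - (k + 1)) + 1 from by omega]
      rw [List.range'_succ, List.foldr_cons]
      rw [hrec]
      rw [show cs.length + 1 - k = (cs.length + 1 - (k+1)) + 1 by omega]
      rw [List.range'_succ, List.map_cons]
      congr 1
      by_cases hs : PySem.Chars.isspace cs[k] = true
      · rw [nwsSpace_getD_lt cs k h, hs]
        rw [if_neg (by decide)]
        rw [show cs.length + 1 - (k + 1) = (cs.length - (k + 1)) + 1 from by omega,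
          List.range'_succ, List.map_cons]
        simp only [List.headD_cons]
        exact (nwsN_space cs k h hs).symm
      · rw [nwsSpace_getD_lt cs k h, eq_false_of_ne_true hs]
        rw [if_pos rfl]
        exact (nwsN_nonspace cs k h (eq_false_of_ne_true hs)).symm
    · have hk' : k = cs.length := by omega
      subst hk'
      simp [nwsN]

theorem nwsNxt_spec_aux (cs : List Char) (k : Nat) (hk : k ≤ cs.length) :
    (List.range' k (cs.length - k)).foldr
      (fun i acc => (if (nwsSpace cs).getD i false = false then i else acc.headD cs.length) :: acc)
      [cs.length]
    = (List.range' k (cs.length + 1 - k)).map (nwsN cs) :=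
  nwsNxt_spec_core cs (cs.length - k) k le_rfl hk

theorem nwsNxt_getD (cs : List Char) (i : Nat) (hi : i ≤ cs.length) :
    (nwsNxt (nwsSpace cs) cs.length).getD i cs.length = nwsN cs i := by
  unfold nwsNxt
  have h0 := nwsNxt_spec_aux cs 0 (Nat.zero_le _)
  simp only [Nat.sub_zero] at h0
  rw [List.range_eq_range', h0]
  rw [List.getD_eq_getElem?_getD, List.getElem?_eq_getElem (by simp; omega)]
  simp

-- skipping the interior of a whitespace run contributes nothing in B
theorem nwsFwd_skip_aux (cs : List Char) (sp : List Bool) (nxt : List Nat) (n : Nat) :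
    ∀ (d i e : Nat), e - i ≤ d → i ≤ e →
    (∀ k, i ≤ k → k < e → k < n ∧ sp.getD k false = true ∧ k ≠ 0 ∧ sp.getD (k - 1) false = true) →
    ∀ (out : List Char) (spans : List (Int × Int)),
    nwsFwd cs sp nxt n i out spans = nwsFwd cs sp nxt n e out spans := by
  intro d
  induction d with
  | zero =>
    intro i e hd h hk out spans
    rw [show i = e from by omega]
  | succ d ih =>
    intro i e hd h hk out spans
    by_cases hie : i = e
    · rw [hie]
    · obtain ⟨h1, h2, h3, h4⟩ := hk i (le_refl i) (by omega)
      rw [nwsFwd, if_pos h1, if_neg (by rw [h2]; simp),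
        if_neg (by push Not; exact ⟨h3, by rw [h4]; simp⟩)]
      exact ih (i + 1) e (by omega) (by omega) (fun k hk1 hk2 => hk k (by omega) hk2) out spans

theorem nwsFwd_skip (cs : List Char) (sp : List Bool) (nxt : List Nat) (n i e : Nat)
    (h : i ≤ e)
    (hk : ∀ k, i ≤ k → k < e → k < n ∧ sp.getD k false = true ∧ k ≠ 0 ∧ sp.getD (k - 1) false = true)
    (out : List Char) (spans : List (Int × Int)) :
    nwsFwd cs sp nxt n i out spans = nwsFwd cs sp nxt n e out spans :=
  nwsFwd_skip_aux cs sp nxt n (e - i) i e le_rfl h hk out spans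

-- main invariant lemma: the two loops agree from any reachable index
theorem nws_main_aux (cs : List Char) :
    ∀ (d i : Nat), cs.length - i ≤ d →
    (i = 0 ∨ (nwsSpace cs).getD (i - 1) false = false ∨ (nwsSpace cs).getD i false = false) →
    ∀ (out : List Char) (spans : List (Int × Int)),
    nwsLoopA cs i out spans =
      nwsFwd cs (nwsSpace cs) (nwsNxt (nwsSpace cs) cs.length) cs.length i out spans := by
  intro d
  induction d with
  | zero =>
    intro i hd hinv out spans
    rw [nwsLoopA, dif_neg (by omega), nwsFwd, if_neg (by omega)]
  | succ d ih =>
    intro i hd hinv out spans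
    by_cases h : i < cs.length
    · by_cases hs : PySem.Chars.isspace cs[i] = true
      · -- whitespace: A jumps to e := nwsInner cs (i+1) = nwsN cs i; B emits ' ' then skips
        have hspi : (nwsSpace cs).getD i false = true := by rw [nwsSpace_getD_lt cs i h, hs]
        have he : nwsInner cs (i + 1) = nwsN cs i := by
          rw [nwsInner_eq cs (i + 1), nwsN_space cs i h hs]; rfl
        have hcond : i = 0 ∨ (nwsSpace cs).getD (i - 1) false = false := by
          rcases hinv with h0 | h1 | h2
          · exact Or.inl h0
          · exact Or.inr h1
          · rw [hspi] at h2; exact absurd h2 (by simp)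
        rw [nwsLoopA]
        simp only [h, dif_pos, hs, if_pos]
        conv_rhs => rw [nwsFwd]
        rw [if_pos h, if_neg (by rw [hspi]; simp), if_pos hcond]
        rw [nwsNxt_getD cs i (by omega), he]
        have hEi : i < nwsN cs i := by
          unfold nwsN
          rw [← List.getElem_cons_drop h, List.takeWhile_cons, hs]
          simp
        rw [nwsFwd_skip cs (nwsSpace cs) _ cs.length (i + 1) (nwsN cs i) (by omega)
          (fun k hk1 hk2 => by
            obtain ⟨hkl, hksp⟩ := nwsN_interior cs i k (by omega) hk2
            have hk1sp : (nwsSpace cs).getD (k - 1) false = true := by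
              by_cases hki : k - 1 = i
              · rw [hki]; exact hspi
              · obtain ⟨hl, hsp'⟩ := nwsN_interior cs i (k - 1) (by omega) (by omega)
                rw [nwsSpace_getD_lt cs _ hl, hsp']
            exact ⟨hkl, by rw [nwsSpace_getD_lt cs k hkl, hksp], by omega, hk1sp⟩)]
        have hNle := nwsN_le cs i (by omega)
        exact ih (nwsN cs i) (by omega) (Or.inr (Or.inr (nwsN_stop cs i))) _ _
      · -- non-whitespace: both emit the character
        have hsf : PySem.Chars.isspace cs[i] = false := eq_false_of_ne_true hs
        have hspi : (nwsSpace cs).getD i false = false := by rw [nwsSpace_getD_lt cs i h, hsf]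
        rw [nwsLoopA]
        simp only [h, dif_pos, hsf, Bool.false_eq_true, if_false]
        conv_rhs => rw [nwsFwd]
        rw [if_pos h, if_pos hspi]
        rw [List.getD_eq_getElem?_getD, List.getElem?_eq_getElem h, Option.getD_some]
        exact ih (i + 1) (by omega) (Or.inr (Or.inl (by simpa using hspi))) _ _
    · rw [nwsLoopA, dif_neg h, nwsFwd, if_neg h]

theorem nws_main (cs : List Char) (i : Nat)
    (hinv : i = 0 ∨ (nwsSpace cs).getD (i - 1) false = false ∨ (nwsSpace cs).getD i false = false)
    (out : List Char) (spans : List (Int × Int)) :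
    nwsLoopA cs i out spans =
      nwsFwd cs (nwsSpace cs) (nwsNxt (nwsSpace cs) cs.length) cs.length i out spans :=
  nws_main_aux cs (cs.length - i) i le_rfl hinv out spans

-- ===== VERDICT (by name: the statement is the Claim_ definition above) =====
theorem normalize_whitespace_with_spans_py_spec : Claim_equal_normalize_whitespace_with_spans_py := by
  intro text _
  unfold Spec_normalize_whitespace_with_spans_py normalize_whitespace_with_spans_py normalize_whitespace_with_spans_py_alt
  rw [nws_main text.toList 0 (Or.inl rfl) [] []]
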